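-- pv_equiv track=rewrite | github.com/emmafdz/FinalDegreeProject | functions_models/rat_functions1.py | return_vector
-- ===== SOURCE A (Python) =====
-- def count(mylist):
--     newlist = []
--     for i in mylist:
--         if i not in newlist:
--             newlist.append(i)
--     return newlist
--
-- def return_vector(coh):
--     coherences = []
--     for a in range(len(coh)):
--         for i in count(coh[a]):
--             coherences.append(i)
--     coherences = count(coherences)
--     coh_vec = sorted(coherences)
--     return(coh_vec)
-- ===== SOURCE B (Python) =====
-- def return_vector(coh):
--     # Flatten once, sort once, and drop duplicates in a single adjacent-dedup
--     # pass over the sorted list (no repeated membership scans).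
--     flat = sorted(x for row in coh for x in row)
--     out = []
--     for x in flat:
--         if not out or x != out[-1]:
--             out.append(x)
--     return out
-- ===== Notes on version B (the rewrite author's own statement) =====
-- stated objective: faster
-- what changed: A dedups each sublist and the concatenation by repeated O(N) membership scans before sorting; B flattens once, sorts once, and removes duplicates in one adjacent-comparison pass over the sorted list.
import Mathlib
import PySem

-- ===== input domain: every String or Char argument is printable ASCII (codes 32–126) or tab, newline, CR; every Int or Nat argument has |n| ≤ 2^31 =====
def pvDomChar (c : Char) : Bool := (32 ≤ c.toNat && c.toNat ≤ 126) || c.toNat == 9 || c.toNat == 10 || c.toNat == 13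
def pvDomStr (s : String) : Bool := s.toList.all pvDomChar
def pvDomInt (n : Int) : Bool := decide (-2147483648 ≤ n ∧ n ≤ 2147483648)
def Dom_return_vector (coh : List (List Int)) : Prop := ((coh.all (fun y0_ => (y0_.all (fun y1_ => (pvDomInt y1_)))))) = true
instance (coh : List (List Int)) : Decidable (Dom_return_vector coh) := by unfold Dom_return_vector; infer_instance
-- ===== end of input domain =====

-- B flattens once, sorts once and dedups in one adjacent-comparison pass,
-- instead of A's repeated O(N) membership scans before the sort.

-- ===== PORT A =====
-- helper count(mylist): dedup keeping first occurrences, via membership scan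
def count (mylist : List Int) : List Int :=
  mylist.foldl (fun newlist i => if i ∈ newlist then newlist else newlist ++ [i]) []

def return_vector (coh : List (List Int)) : List Int :=
  let coherences :=
    (PySem.List.pyRange 0 (PySem.List.len coh) 1).foldl
      (fun acc a => acc ++ count (PySem.List.pyGetD coh a [])) []
  let coherences2 := count coherences
  PySem.List.sorted coherences2 (fun x => x) false

-- ===== PORT B =====
def return_vector_alt (coh : List (List Int)) : List Int :=
  let flat := PySem.List.sorted (coh.flatMap (fun row => row)) (fun x => x) false
  -- 'if not out or x != out[-1]': out[-1] on a nonempty list is its last element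
  flat.foldl (fun out x => if out = [] ∨ PySem.List.pyGet? out (-1) ≠ some x then out ++ [x] else out) []

-- ===== PRECONDITION & SPEC =====
def Spec_return_vector (coh : List (List Int)) (out : List Int) : Prop := out = return_vector_alt coh
instance (coh : List (List Int)) (out : List Int) : Decidable (Spec_return_vector coh out) := by unfold Spec_return_vector; infer_instance

-- ===== CLAIM (what is proved, stated in full; the proofs are below) =====
def Claim_equal_return_vector : Prop := ∀ (coh : List (List Int)), Dom_return_vector coh → Spec_return_vector coh (return_vector coh)

-- ===== LEMMAS AND PROOFS =====

-- A's count: membership and nodup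
lemma count_foldl_mem (xs acc : List Int) (y : Int) :
    (y ∈ xs.foldl (fun newlist i => if i ∈ newlist then newlist else newlist ++ [i]) acc) ↔
      y ∈ acc ∨ y ∈ xs := by
  induction xs generalizing acc with
  | nil => simp
  | cons x t ih =>
    simp only [List.foldl_cons]
    by_cases hx : x ∈ acc
    · rw [if_pos hx, ih]
      simp only [List.mem_cons]
      constructor
      · rintro (h | h)
        exacts [Or.inl h, Or.inr (Or.inr h)]
      · rintro (h | h | h)
        exacts [Or.inl h, Or.inl (h ▸ hx), Or.inr h]
    · rw [if_neg hx, ih]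
      simp only [List.mem_append, List.mem_cons]
      tauto

lemma count_foldl_nodup (xs acc : List Int) (h : acc.Nodup) :
    (xs.foldl (fun newlist i => if i ∈ newlist then newlist else newlist ++ [i]) acc).Nodup := by
  induction xs generalizing acc with
  | nil => simpa
  | cons x t ih =>
    simp only [List.foldl_cons]
    by_cases hx : x ∈ acc
    · simpa [hx] using ih acc h
    · simp only [hx, if_false]
      exact ih _ (by
        simp only [List.nodup_append, List.nodup_singleton, h, true_and]
        intro a ha b hb
        simp only [List.mem_singleton] at hb
        exact fun he => hx ((hb ▸ he) ▸ ha))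

lemma mem_count (xs : List Int) (y : Int) : y ∈ count xs ↔ y ∈ xs := by
  simpa using count_foldl_mem xs [] y

lemma nodup_count (xs : List Int) : (count xs).Nodup :=
  count_foldl_nodup xs [] List.nodup_nil

-- last element of a strictly increasing list bounds all its elements
lemma le_getLast_of_pairwise_lt (out : List Int) (h : out.Pairwise (· < ·)) (l : Int)
    (hl : out.getLast? = some l) : ∀ a ∈ out, a ≤ l := by
  induction out with
  | nil => simp at hl
  | cons x t ih =>
    intro a ha
    cases t with
    | nil =>
      simp at hl ha; omega
    | cons y u =>
      have hlast : (y :: u).getLast? = some l := by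
        simpa [List.getLast?_cons_cons] using hl
      have hp : (y :: u).Pairwise (· < ·) := (List.pairwise_cons.1 h).2
      rcases List.mem_cons.1 ha with h1 | ha
      · have hy : x < y := (List.pairwise_cons.1 h).1 y (by simp)
        have := ih hp hlast y (by simp)
        omega
      · exact ih hp hlast a ha

-- the adjacent-dedup fold over a non-decreasing list: strictly increasing result, same members
lemma uniq_fold_spec (xs : List Int) : ∀ (out : List Int),
    xs.Pairwise (· ≤ ·) → out.Pairwise (· < ·) → (∀ a ∈ out, ∀ b ∈ xs, a ≤ b) →
    (xs.foldl (fun out x => if out = [] ∨ PySem.List.pyGet? out (-1) ≠ some x then out ++ [x] else out) out).Pairwise (· < ·)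
    ∧ (∀ y, y ∈ xs.foldl (fun out x => if out = [] ∨ PySem.List.pyGet? out (-1) ≠ some x then out ++ [x] else out) out ↔ y ∈ out ∨ y ∈ xs) := by
  induction xs with
  | nil => intro out _ hout _; exact ⟨hout, by simp⟩
  | cons x t ih =>
    intro out hs hout hbound
    have hs' : t.Pairwise (· ≤ ·) := (List.pairwise_cons.1 hs).2
    have hxle : ∀ b ∈ t, x ≤ b := (List.pairwise_cons.1 hs).1
    simp only [List.foldl_cons]
    by_cases hc : out = [] ∨ PySem.List.pyGet? out (-1) ≠ some x
    · rw [if_pos hc]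
      have hlt : ∀ a ∈ out, a < x := by
        intro a ha
        rcases hc with hc | hc
        · simp [hc] at ha
        · rw [PySem.List.pyGet?_neg_one] at hc
          have hne : out ≠ [] := fun h => by simp [h] at ha
          obtain ⟨l, hl⟩ := Option.ne_none_iff_exists'.1 (mt List.getLast?_eq_none_iff.1 hne)
          have hal := le_getLast_of_pairwise_lt out hout l hl a ha
          have hlm : l ∈ out := List.mem_of_getLast? hl
          have hlx : l ≤ x := hbound l hlm x (by simp)
          have : l ≠ x := fun h => hc (h ▸ hl)
          omega
      have hout' : (out ++ [x]).Pairwise (· < ·) := by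
        rw [List.pairwise_append]
        exact ⟨hout, by simp, by simpa using hlt⟩
      have hbound' : ∀ a ∈ out ++ [x], ∀ b ∈ t, a ≤ b := by
        intro a ha b hb
        rcases List.mem_append.1 ha with ha | ha
        · exact hbound a ha b (by simp [hb])
        · simp at ha; exact ha ▸ hxle b hb
      obtain ⟨h1, h2⟩ := ih (out ++ [x]) hs' hout' hbound'
      refine ⟨h1, fun y => ?_⟩
      rw [h2 y]
      simp only [List.mem_append, List.mem_cons]
      tauto
    · rw [if_neg hc]
      push Not at hc
      obtain ⟨hne, hlast⟩ := hc
      rw [PySem.List.pyGet?_neg_one] at hlast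
      have hxm : x ∈ out := List.mem_of_getLast? hlast
      have hbound' : ∀ a ∈ out, ∀ b ∈ t, a ≤ b := fun a ha b hb => hbound a ha b (by simp [hb])
      obtain ⟨h1, h2⟩ := ih out hs' hout hbound'
      refine ⟨h1, fun y => ?_⟩
      rw [h2 y]
      simp only [List.mem_cons]
      constructor
      · rintro (h | h) <;> tauto
      · rintro (h | h | h)
        · tauto
        · exact Or.inl (h ▸ hxm)
        · tauto

-- ===== VERDICT (by name: the statement is the Claim_ definition above) =====
theorem return_vector_spec : Claim_equal_return_vector := by
  intro coh _
  unfold Spec_return_vector return_vector return_vector_alt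
  simp only []
  -- A side: the index loop is a fold over coh, appending count(row)
  rw [PySem.List.foldl_pyRange_zero_pyGetD coh [] (fun acc row => acc ++ count row) []]
  rw [PySem.List.foldl_append_eq_flatMap]
  simp only [List.nil_append]
  set C : List Int := count (coh.flatMap count) with hC
  set S : List Int := PySem.List.sorted (coh.flatMap (fun row => row)) (fun x => x) false with hS
  set R : List Int :=
    S.foldl (fun out x => if out = [] ∨ PySem.List.pyGet? out (-1) ≠ some x then out ++ [x] else out) [] with hR
  have hSp : S.Pairwise (· ≤ ·) := PySem.List.sorted_pairwise _ _
  obtain ⟨hRp, hRmem⟩ := uniq_fold_spec S [] hSp (by simp) (by simp)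
  have hRnodup : R.Nodup := hRp.imp (fun h => ne_of_lt h)
  have hmem : ∀ y, y ∈ R ↔ y ∈ C := by
    intro y
    rw [hRmem y, hC]
    simp [PySem.List.mem_sorted, mem_count, List.mem_flatMap, hS]
  have hperm : R.Perm C := (List.perm_ext_iff_of_nodup hRnodup (nodup_count _)).2 hmem
  exact PySem.List.sorted_eq_of_perm_of_pairwise_lt C R (fun x => x) hperm hRp
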